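-- pv_equiv track=rewrite | github.com/qualixar/superlocalmemory | src/superlocalmemory/learning/trigram_index.py | _trigrams_for
-- ===== SOURCE A (Python) =====
-- import unicodedata
--
-- _MAX_INPUT_CHARS: int = 500
--
-- def _trigrams_for(text: str) -> set[str]:
--     """Extract 3-gram set from ``text``.
--
--     Pipeline: clamp-to-500-chars -> NFKD normalize -> ASCII-fold ->
--     lowercase -> split on non-alphanumeric -> skip tokens < 3 chars ->
--     emit overlapping 3-grams per token.
--
--     Matches LLD-13 §4.1 exactly. stdlib-only.
--     """
--     if not text:
--         return set()
--     s = unicodedata.normalize("NFKD", text[:_MAX_INPUT_CHARS])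
--     s = s.encode("ascii", "ignore").decode("ascii").lower()
--     s = "".join(c if c.isalnum() else " " for c in s)
--     out: set[str] = set()
--     for token in s.split():
--         if len(token) < 3:
--             continue
--         for i in range(len(token) - 2):
--             out.add(token[i : i + 3])
--     return out
-- ===== SOURCE B (Python) =====
-- import unicodedata
--
-- _MAX_INPUT_CHARS: int = 500
--
--
-- def _trigrams_for(text: str) -> set[str]:
--     """Extract 3-gram set from ``text``.
--
--     Streaming re-decomposition: after the NFKD normalize + ascii-fold of the
--     clamped input, a single stateful pass walks the characters once, keeping a
--     rolling window of the last (at most two) lowercased alphanumeric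
--     characters of the current run; each alphanumeric character completes at
--     most one trigram, and any non-alphanumeric character resets the window.
--     No intermediate cleaned string, no split, no nested loop, no slicing of
--     tokens.
--     """
--     s = unicodedata.normalize("NFKD", text[:_MAX_INPUT_CHARS])
--     s = s.encode("ascii", "ignore").decode("ascii")
--     out: set[str] = set()
--     win = ""
--     for ch in s:
--         if ch.isalnum():
--             win += ch.lower()
--             if len(win) == 3:
--                 out.add(win)
--                 win = win[1:]
--         else:
--             win = ""
--     return out
-- ===== Notes on version B (the rewrite author's own statement) =====
-- stated objective: alternative
-- what changed: Replaces A's staged pipeline (build a cleaned space-padded string, split it into tokens, nested per-token trigram loop with slicing) by one stateful streaming pass that keeps a rolling window of the last two lowercased alphanumeric characters and emits a trigram per alphanumeric character, resetting on separators.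
import Mathlib
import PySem

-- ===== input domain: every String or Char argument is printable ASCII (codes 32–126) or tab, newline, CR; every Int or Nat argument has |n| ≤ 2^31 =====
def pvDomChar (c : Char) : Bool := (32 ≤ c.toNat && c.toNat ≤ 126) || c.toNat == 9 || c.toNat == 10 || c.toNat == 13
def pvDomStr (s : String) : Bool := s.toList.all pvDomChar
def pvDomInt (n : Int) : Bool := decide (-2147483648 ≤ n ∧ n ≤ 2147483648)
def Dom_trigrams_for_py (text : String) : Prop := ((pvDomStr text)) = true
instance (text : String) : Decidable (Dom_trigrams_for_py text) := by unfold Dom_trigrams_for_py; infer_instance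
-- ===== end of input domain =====

-- B replaces A's staged pipeline (cleaned space-padded string → split → nested per-token
-- trigram loop) by one stateful streaming pass with a rolling ≤2-char window (alternative
-- decomposition; same result set).

-- ===== PORT A =====
-- NFKD normalization and the ascii-fold (encode 'ascii','ignore') are the identity on the
-- printable-ASCII input domain Dom_trigrams_for_py; they are ported as the identity (exact on Dom).
def trigrams_for_py (text : String) : List String :=
  if text.toList = [] then []
  else
    let s0 := PySem.Chars.lower (PySem.List.slice text.toList none (some 500))
    let s := s0.map (fun c => if PySem.Chars.isalnum c then c else ' ')
    (PySem.Chars.split₀ s).foldl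
      (fun out token =>
        if token.length < 3 then out
        else
          (PySem.List.pyRange 0 ((token.length : Int) - 2) 1).foldl
            (fun out i =>
              PySem.Set.add out (String.ofList (PySem.List.slice token (some i) (some (i + 3))))) out)
      PySem.Set.empty

-- ===== PORT B =====
-- same identity NFKD/ascii-fold on Dom as above; then one streaming pass over the characters,
-- state = (rolling window of the last ≤2 lowercased alnum chars of the current run, result set).
-- the loop body of Source B, as a named helper
def pvStepB (st : List Char × PySem.Set String) (ch : Char) : List Char × PySem.Set String :=
  if PySem.Chars.isalnum ch then
    let win := st.1 ++ [PySem.Chars.lowerChar ch]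
    if win.length == 3 then
      (PySem.List.slice win (some 1) none, PySem.Set.add st.2 (String.ofList win))
    else (win, st.2)
  else ([], st.2)

def trigrams_for_py_alt (text : String) : List String :=
  ((PySem.List.slice text.toList none (some 500)).foldl pvStepB ([], PySem.Set.empty)).2

-- ===== PRECONDITION & SPEC =====
def Spec_trigrams_for_py (text : String) (out : List String) : Prop := out = trigrams_for_py_alt text
instance (text : String) (out : List String) : Decidable (Spec_trigrams_for_py text out) := by unfold Spec_trigrams_for_py; infer_instance

-- ===== CLAIM (what is proved, stated in full; the proofs are below) =====
def Claim_equal_trigrams_for_py : Prop := ∀ (text : String), Dom_trigrams_for_py text → Spec_trigrams_for_py text (trigrams_for_py text)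

-- ===== LEMMAS AND PROOFS =====

-- the space-free 3-char windows of a char list, left to right
def pvWin : List Char → List String
  | [] => []
  | a :: rest =>
      (match rest with
       | b :: c :: _ =>
           if ' ' == a || ' ' == b || ' ' == c then [] else [String.ofList [a, b, c]]
       | _ => []) ++ pvWin rest

-- all 3-char windows of a char list (A's per-token trigram list)
def pvTri (t : List Char) : List String :=
  (List.range (t.length - 2)).map (fun k => String.ofList ((t.drop k).take 3))

-- A's per-character cleaning, fused: clean1 c = (if isalnum x then x else ' ') for x = lower c
def pvClean1 (c : Char) : Char :=
  if PySem.Chars.isalnum (PySem.Chars.lowerChar c) then PySem.Chars.lowerChar c else ' '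

theorem pvAlnumChar (c : Char) (h : PySem.Chars.isalnum c = true) :
    ((' ' == c) = false) ∧ (PySem.Chars.isspace c = false) := by
  have hr : (48 ≤ c.toNat ∧ c.toNat ≤ 57) ∨ (97 ≤ c.toNat ∧ c.toNat ≤ 122) ∨
      (65 ≤ c.toNat ∧ c.toNat ≤ 90) := by
    simp only [PySem.Chars.isalnum, PySem.Chars.isalpha, PySem.Chars.isdigit, PySem.Chars.isupper,
      PySem.Chars.islower, Bool.or_eq_true, Bool.and_eq_true, decide_eq_true_eq, Char.le_def] at h
    rcases h with (h | h) | h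
    · right; right; exact h
    · right; left; exact h
    · left; exact h
  constructor
  · apply beq_eq_false_iff_ne.mpr
    intro he; subst he; simp [Char.toNat] at hr
  · cases hb : PySem.Chars.isspace c with
    | false => rfl
    | true =>
      exfalso
      simp only [PySem.Chars.isspace, Bool.or_eq_true, Bool.and_eq_true, decide_eq_true_eq] at hb
      omega

-- lowercasing does not change alphanumericity
theorem pvLowAln (c : Char) :
    PySem.Chars.isalnum (PySem.Chars.lowerChar c) = PySem.Chars.isalnum c := by
  by_cases hu : PySem.Chars.isupper c = true
  · have hb : 65 ≤ c.toNat ∧ c.toNat ≤ 90 := by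
      have h := hu
      simp only [PySem.Chars.isupper, Bool.and_eq_true, decide_eq_true_eq, Char.le_def] at h
      exact h
    have hl : PySem.Chars.lowerChar c = Char.ofNat (c.toNat + 32) := by
      simp [PySem.Chars.lowerChar, hu]
    have hn : (Char.ofNat (c.toNat + 32)).toNat = c.toNat + 32 := by
      rw [Char.toNat_ofNat, if_pos]; exact Or.inl (by omega)
    have hlow : PySem.Chars.islower (Char.ofNat (c.toNat + 32)) = true := by
      simp only [PySem.Chars.islower, Bool.and_eq_true, decide_eq_true_eq, Char.le_def]
      constructor
      · show (97 : Nat) ≤ (Char.ofNat (c.toNat + 32)).toNat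
        omega
      · show (Char.ofNat (c.toNat + 32)).toNat ≤ (122 : Nat)
        omega
    have h1 : PySem.Chars.isalnum (PySem.Chars.lowerChar c) = true := by
      rw [hl]
      simp [PySem.Chars.isalnum, PySem.Chars.isalpha, hlow]
    have h2 : PySem.Chars.isalnum c = true := by
      simp [PySem.Chars.isalnum, PySem.Chars.isalpha, hu]
    rw [h1, h2]
  · simp [PySem.Chars.lowerChar, hu]

theorem pvWin_cons3 (a b c : Char) (rest : List Char) :
    pvWin (a :: b :: c :: rest)
      = (if ' ' == a || ' ' == b || ' ' == c then [] else [String.ofList [a, b, c]])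
          ++ pvWin (b :: c :: rest) := rfl

theorem pvWin_space_cons (v : List Char) : pvWin (' ' :: v) = pvWin v := by
  match v with
  | [] => rfl
  | [x] => rfl
  | x :: y :: v' => rw [pvWin_cons3]; simp

theorem pvWin_space_one (a : Char) (v : List Char) : pvWin (a :: ' ' :: v) = pvWin v := by
  match v with
  | [] => rfl
  | x :: v' => rw [pvWin_cons3]; simp [pvWin_space_cons]

theorem pvWin_append_space : ∀ (u v : List Char), pvWin (u ++ ' ' :: v) = pvWin u ++ pvWin v
  | [], v => by simpa using pvWin_space_cons v
  | [a], v => by simpa using pvWin_space_one a v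
  | [a, b], v => by
      have h1 : pvWin ([a, b] ++ ' ' :: v) = pvWin (a :: b :: ' ' :: v) := rfl
      have h2 : pvWin [a, b] = [] := rfl
      rw [h1, pvWin_cons3, pvWin_space_one, h2]
      simp
  | a :: b :: c :: rest, v => by
      have ih := pvWin_append_space (b :: c :: rest) v
      simp only [List.cons_append] at ih ⊢
      rw [pvWin_cons3, ih, pvWin_cons3, List.append_assoc]

theorem pvWin_short (w : List Char) (h : w.length ≤ 2) : pvWin w = [] := by
  match w with
  | [] => rfl
  | [a] => rfl
  | [a, b] => rfl
  | a :: b :: c :: r => simp at h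

theorem pvTri_cons3 (a b c : Char) (rest : List Char) :
    pvTri (a :: b :: c :: rest) = String.ofList [a, b, c] :: pvTri (b :: c :: rest) := by
  simp [pvTri, List.range_succ_eq_map, List.map_map, Function.comp_def]

theorem pvTri_short (t : List Char) (h : t.length < 3) : pvTri t = [] := by
  have h0 : t.length - 2 = 0 := by omega
  simp [pvTri, h0]

theorem pvTri_eq_pvWin : ∀ (t : List Char), (∀ c ∈ t, (' ' == c) = false) → pvTri t = pvWin t
  | [], _ => rfl
  | [a], _ => rfl
  | [a, b], _ => rfl
  | a :: b :: c :: rest, h => by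
      have ih := pvTri_eq_pvWin (b :: c :: rest) (fun x hx => h x (by simp at hx ⊢; tauto))
      rw [pvTri_cons3, pvWin_cons3, ih]
      have ha := h a (by simp)
      have hb := h b (by simp)
      have hc := h c (by simp)
      simp [ha, hb, hc]

theorem pvGo : ∀ (s cur : List Char) (acc : List (List Char)),
    (∀ c ∈ s, PySem.Chars.isspace c = (' ' == c)) → (∀ c ∈ cur, (' ' == c) = false) →
    (PySem.Chars.split₀.go s cur acc).flatMap pvTri
      = acc.reverse.flatMap pvTri ++ pvWin (cur.reverse ++ s)
  | [], cur, acc, _, hcur => by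
      simp only [PySem.Chars.split₀.go]
      by_cases hc : cur = []
      · subst hc; simp [pvWin]
      · rw [if_neg (by simpa [List.isEmpty_iff] using hc)]
        rw [List.append_nil, List.reverse_cons, List.flatMap_append]
        simp only [List.flatMap_cons, List.flatMap_nil, List.append_nil]
        rw [pvTri_eq_pvWin cur.reverse (fun x hx => hcur x (List.mem_reverse.mp hx))]
  | c :: rest, cur, acc, hs, hcur => by
      simp only [PySem.Chars.split₀.go]
      by_cases hsp : PySem.Chars.isspace c = true
      · rw [if_pos hsp]
        have hc : ' ' = c := eq_of_beq (by rw [← hs c (by simp), hsp])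
        have hs' : ∀ x ∈ rest, PySem.Chars.isspace x = (' ' == x) := fun x hx => hs x (by simp [hx])
        subst hc
        by_cases hc0 : cur = []
        · subst hc0
          rw [if_pos (show List.isEmpty ([] : List Char) = true from rfl)]
          rw [pvGo rest [] acc hs' (by simp)]
          simp [pvWin_space_cons]
        · rw [if_neg (by simpa [List.isEmpty_iff] using hc0)]
          rw [pvGo rest [] (cur.reverse :: acc) hs' (by simp)]
          have htw : pvTri cur.reverse = pvWin cur.reverse :=
            pvTri_eq_pvWin cur.reverse (fun x hx => hcur x (List.mem_reverse.mp hx))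
          rw [pvWin_append_space]
          simp [htw, List.append_assoc]
      · rw [if_neg hsp]
        have hs' : ∀ x ∈ rest, PySem.Chars.isspace x = (' ' == x) := fun x hx => hs x (by simp [hx])
        have hcnot : (' ' == c) = false := by
          rw [← hs c (by simp)]; simpa using hsp
        have hcur' : ∀ x ∈ (c :: cur), (' ' == x) = false := by
          intro x hx
          rcases List.mem_cons.mp hx with h | h
          · subst h; exact hcnot
          · exact hcur x h
        rw [pvGo rest (c :: cur) acc hs' hcur']
        simp [List.append_assoc]

theorem pvSplitFlat (s : List Char) (hs : ∀ c ∈ s, PySem.Chars.isspace c = (' ' == c)) :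
    (PySem.Chars.split₀ s).flatMap pvTri = pvWin s := by
  have h := pvGo s [] [] hs (by simp)
  simpa [PySem.Chars.split₀] using h

theorem pvInner (t : List Char) (out : PySem.Set String) :
    (PySem.List.pyRange 0 ((t.length : Int) - 2) 1).foldl
      (fun out i => PySem.Set.add out (String.ofList (PySem.List.slice t (some i) (some (i + 3))))) out
      = PySem.Set.update out (pvTri t) := by
  rw [← PySem.Set.update_map_eq_foldl_add]
  congr 1
  rw [PySem.List.pyRange_one, List.map_map]
  have hn : (((t.length : Int) - 2) - 0).toNat = t.length - 2 := by omega
  rw [hn]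
  apply List.map_congr_left
  intro k _
  have h := PySem.List.slice_natCast_add t k 3
  simp only [Function.comp_def, zero_add]
  rw [show ((k : Int) + 3) = ((k : Int) + ((3 : Nat) : Int)) by push_cast; ring, h]

theorem pvFoldUpdate (ts : List (List Char)) (init : PySem.Set String) :
    ts.foldl (fun out t => PySem.Set.update out (pvTri t)) init
      = PySem.Set.update init (ts.flatMap pvTri) := by
  induction ts generalizing init with
  | nil => simp [PySem.Set.update]
  | cons t ts ih =>
      simp only [List.foldl_cons, List.flatMap_cons]
      rw [ih]
      show PySem.Set.update _ _ = PySem.Set.update init (pvTri t ++ ts.flatMap pvTri)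
      unfold PySem.Set.update
      rw [List.foldl_append]

-- A's whole token loop = all space-free windows of the cleaned string, as a set update
theorem pvA (s : List Char) (hsp : ∀ c ∈ s, PySem.Chars.isspace c = (' ' == c)) :
    (PySem.Chars.split₀ s).foldl
      (fun out token =>
        if token.length < 3 then out
        else
          (PySem.List.pyRange 0 ((token.length : Int) - 2) 1).foldl
            (fun out i =>
              PySem.Set.add out (String.ofList (PySem.List.slice token (some i) (some (i + 3))))) out)
      PySem.Set.empty = PySem.Set.update PySem.Set.empty (pvWin s) := by
  rw [PySem.List.foldl_congr_mem _ _
    (fun out t => PySem.Set.update out (pvTri t)) _ ?_]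
  · rw [pvFoldUpdate, pvSplitFlat s hsp]
  · intro acc t _
    beta_reduce
    by_cases h3 : t.length < 3
    · rw [if_pos h3, pvTri_short t h3]; rfl
    · rw [if_neg h3]; exact pvInner t acc

-- properties of pvClean1
theorem pvClean1_alnum (c : Char) (h : PySem.Chars.isalnum c = true) :
    pvClean1 c = PySem.Chars.lowerChar c ∧ ((' ' == PySem.Chars.lowerChar c) = false) := by
  have ha : PySem.Chars.isalnum (PySem.Chars.lowerChar c) = true := by rw [pvLowAln]; exact h
  exact ⟨by simp [pvClean1, ha], (pvAlnumChar _ ha).1⟩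

theorem pvClean1_not_alnum (c : Char) (h : ¬ PySem.Chars.isalnum c = true) :
    pvClean1 c = ' ' := by
  have ha : ¬ PySem.Chars.isalnum (PySem.Chars.lowerChar c) = true := by rw [pvLowAln]; exact h
  simp [pvClean1, ha]

-- B's streaming pass: invariant over the rolling window
theorem pvB : ∀ (l win : List Char) (out : PySem.Set String),
    win.length ≤ 2 → (∀ c ∈ win, (' ' == c) = false) →
    (l.foldl pvStepB (win, out)).2 = PySem.Set.update out (pvWin (win ++ l.map pvClean1))
  | [], win, out, hlen, _ => by
      simp [pvWin_short win hlen, PySem.Set.update]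
  | c :: l, win, out, hlen, hns => by
      rw [List.foldl_cons, List.map_cons]
      by_cases ha : PySem.Chars.isalnum c = true
      · obtain ⟨hc1, hcn⟩ := pvClean1_alnum c ha
        rw [hc1]
        by_cases h2 : win.length = 2
        · obtain ⟨a, b, rfl⟩ : ∃ a b, win = [a, b] := by
            match win, h2 with
            | [a, b], _ => exact ⟨a, b, rfl⟩
          have hna := hns a (by simp)
          have hnb := hns b (by simp)
          have hstep : pvStepB ([a, b], out) c
              = ([b, PySem.Chars.lowerChar c],
                 PySem.Set.add out (String.ofList [a, b, PySem.Chars.lowerChar c])) := by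
            simp [pvStepB, ha, PySem.List.slice_from_one]
          rw [hstep, pvB l [b, PySem.Chars.lowerChar c] _ (by simp)
            (by intro x hx
                simp only [List.mem_cons, List.not_mem_nil, or_false] at hx
                rcases hx with rfl | rfl
                · exact hnb
                · exact hcn)]
          have hlist : ([a, b] : List Char) ++ PySem.Chars.lowerChar c :: l.map pvClean1
              = a :: b :: PySem.Chars.lowerChar c :: l.map pvClean1 := rfl
          rw [hlist, pvWin_cons3, hna, hnb, hcn]
          rfl
        · have hstep : pvStepB (win, out) c = (win ++ [PySem.Chars.lowerChar c], out) := by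
            have h3 : ((win ++ [PySem.Chars.lowerChar c]).length == 3) = false := by
              simp only [List.length_append, List.length_cons, List.length_nil, beq_eq_false_iff_ne]
              omega
            simp only [pvStepB]
            rw [if_pos ha, if_neg (by rw [h3]; simp)]
          rw [hstep, pvB l (win ++ [PySem.Chars.lowerChar c]) out
            (by simp only [List.length_append, List.length_cons, List.length_nil]; omega)
            (by intro x hx
                rcases List.mem_append.mp hx with hx | hx
                · exact hns x hx
                · simp only [List.mem_singleton] at hx; subst hx; exact hcn)]
          rw [List.append_assoc]
          rfl
      · have hstep : pvStepB (win, out) c = ([], out) := by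
          simp [pvStepB, ha]
        rw [hstep, pvB l [] out (by simp) (by simp),
          pvClean1_not_alnum c ha, pvWin_append_space, pvWin_short win hlen]
        simp

-- ===== VERDICT (by name: the statement is the Claim_ definition above) =====
theorem trigrams_for_py_spec : Claim_equal_trigrams_for_py := by
  intro text _
  unfold Spec_trigrams_for_py trigrams_for_py trigrams_for_py_alt
  by_cases hg : text.toList = []
  · rw [hg]
    simp [PySem.List.slice]
  · rw [if_neg hg]
    have hmap : (PySem.Chars.lower (PySem.List.slice text.toList none (some 500))).map
          (fun c => if PySem.Chars.isalnum c then c else ' ')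
        = (PySem.List.slice text.toList none (some 500)).map pvClean1 := by
      show ((PySem.List.slice text.toList none (some 500)).map PySem.Chars.lowerChar).map _ = _
      rw [List.map_map]
      rfl
    have hsp : ∀ c ∈ (PySem.List.slice text.toList none (some 500)).map pvClean1,
        PySem.Chars.isspace c = (' ' == c) := by
      intro c hc
      obtain ⟨d, _, rfl⟩ := List.mem_map.mp hc
      by_cases hd : PySem.Chars.isalnum d = true
      · obtain ⟨h1, _⟩ := pvClean1_alnum d hd
        rw [h1]
        have hdl : PySem.Chars.isalnum (PySem.Chars.lowerChar d) = true := by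
          rw [pvLowAln]; exact hd
        obtain ⟨hx, hy⟩ := pvAlnumChar _ hdl
        rw [hx, hy]
      · rw [pvClean1_not_alnum d hd]; decide
    have ha := pvA ((PySem.Chars.lower (PySem.List.slice text.toList none (some 500))).map
      (fun c => if PySem.Chars.isalnum c then c else ' '))
      (by rw [hmap]; exact hsp)
    have hb := pvB (PySem.List.slice text.toList none (some 500)) [] PySem.Set.empty
      (by simp) (by simp)
    have hb' : (List.foldl pvStepB ([], PySem.Set.empty)
          (PySem.List.slice text.toList none (some 500))).2
        = PySem.Set.update PySem.Set.empty
            (pvWin ((PySem.List.slice text.toList none (some 500)).map pvClean1)) := by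
      simpa using hb
    rw [← hmap] at hb'
    exact ha.trans hb'.symm
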